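-- pv_equiv track=rewrite | github.com/theFutureGuy/Competive-Coding-Solutions | array pairs.py | solve
-- ===== SOURCE A (Python) =====
-- def solve(a,n):
--     nb = 0
--     for i in range(n - 1):
--         for j in range(i + 1, n):
--             m = max(a[i:j + 1])
--             if a[i] * a[j] <= m:
--                 nb += 1
--     return nb
-- ===== SOURCE B (Python) =====
-- def solve(a, n):
--     nb = 0
--     for i in range(n - 1):
--         m = a[i]
--         for j in range(i + 1, n):
--             if m < a[j]:
--                 m = a[j]
--             if a[i] * a[j] <= m:
--                 nb += 1
--     return nb
-- ===== Notes on version B (the rewrite author's own statement) =====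
-- stated objective: faster
-- what changed: Maintains an incremental running maximum as j grows instead of recomputing max over the slice a[i:j+1] for every pair, dropping the inner rescan.
import Mathlib
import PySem

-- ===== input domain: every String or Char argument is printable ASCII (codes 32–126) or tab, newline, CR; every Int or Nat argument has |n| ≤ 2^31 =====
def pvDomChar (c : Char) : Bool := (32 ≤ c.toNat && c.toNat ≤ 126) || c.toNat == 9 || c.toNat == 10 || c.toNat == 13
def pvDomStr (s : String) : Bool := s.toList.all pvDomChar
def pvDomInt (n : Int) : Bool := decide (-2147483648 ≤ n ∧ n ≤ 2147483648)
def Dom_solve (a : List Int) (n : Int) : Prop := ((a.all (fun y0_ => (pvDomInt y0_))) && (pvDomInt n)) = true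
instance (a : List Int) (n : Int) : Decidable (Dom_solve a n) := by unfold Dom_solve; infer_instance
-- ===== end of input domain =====

-- B replaces the per-pair slice rescan max(a[i:j+1]) by a running maximum carried as j grows (O(n^3) → O(n^2)).

-- ===== PORT A =====
def solve (a : List Int) (n : Int) : Int :=
  (PySem.List.pyRange 0 (n - 1) 1).foldl (fun nb i =>
    (PySem.List.pyRange (i + 1) n 1).foldl (fun nb j =>
      match PySem.List.max? (PySem.List.slice a (some i) (some (j + 1))) (fun y => y) with
      | some m =>
          if PySem.List.pyGetD a i 0 * PySem.List.pyGetD a j 0 ≤ m then nb + 1 else nb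
      | none => nb) nb) 0

-- ===== PORT B =====
def solve_alt (a : List Int) (n : Int) : Int :=
  (PySem.List.pyRange 0 (n - 1) 1).foldl (fun nb i =>
    ((PySem.List.pyRange (i + 1) n 1).foldl (fun (p : Int × Int) j =>
        let aj := PySem.List.pyGetD a j 0
        let m := if p.1 < aj then aj else p.1
        (m, if PySem.List.pyGetD a i 0 * aj ≤ m then p.2 + 1 else p.2))
      (PySem.List.pyGetD a i 0, nb)).2) 0

-- ===== PRECONDITION & SPEC =====
-- Pre_ excludes n > len(a) with n ≥ 2, exactly where Python A raises IndexError on a[j].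
def Pre_solve (a : List Int) (n : Int) : Prop := n ≤ (a.length : Int) ∨ n ≤ 1
instance (a : List Int) (n : Int) : Decidable (Pre_solve a n) := by unfold Pre_solve; infer_instance
def pvWitness_solve : List Int × Int := ([1, 2, 3], 3)

def Spec_solve (a : List Int) (n : Int) (out : Int) : Prop := out = solve_alt a n
instance (a : List Int) (n : Int) (out : Int) : Decidable (Spec_solve a n out) := by unfold Spec_solve; infer_instance

-- ===== CLAIM (what is proved, stated in full; the proofs are below) =====
def Claim_equal_solve : Prop := ∀ (a : List Int) (n : Int), Dom_solve a n → Pre_solve a n → Spec_solve a n (solve a n)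

-- ===== LEMMAS AND PROOFS =====

lemma slice_single (a : List Int) (i : Int) (h0 : 0 ≤ i) (h1 : i < (a.length : Int)) :
    PySem.List.slice a (some i) (some (i + 1)) = [PySem.List.pyGetD a i 0] := by
  have hlt : i.toNat < a.length := by omega
  rw [PySem.List.slice_toNat a h0 (by omega),
      PySem.List.pyGetD_eq_getElem a 0 h0 h1]
  have h2 : (i + 1).toNat - i.toNat = 1 := by omega
  rw [h2, List.drop_eq_getElem_cons hlt]
  rfl

lemma slice_snoc (a : List Int) (i j : Int) (h0 : 0 ≤ i) (hij : i ≤ j)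
    (hj : j < (a.length : Int)) :
    PySem.List.slice a (some i) (some (j + 1))
      = PySem.List.slice a (some i) (some j) ++ [PySem.List.pyGetD a j 0] := by
  have hjn : j.toNat < a.length := by omega
  rw [PySem.List.slice_toNat a h0 (by omega), PySem.List.slice_toNat a h0 (by omega),
      PySem.List.pyGetD_eq_getElem a 0 (by omega) hj]
  have h2 : (j + 1).toNat - i.toNat = (j.toNat - i.toNat) + 1 := by omega
  rw [h2, List.take_add_one]
  have h3 : (List.drop i.toNat a)[j.toNat - i.toNat]? = some a[j.toNat] := by
    rw [List.getElem?_drop]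
    have h4 : i.toNat + (j.toNat - i.toNat) = j.toNat := by omega
    rw [h4, List.getElem?_eq_getElem hjn]
  rw [h3]
  simp

lemma max?_snoc (s : List Int) (y m : Int)
    (h : (PySem.List.max? s (fun x => x)) = some m) :
    (PySem.List.max? (s ++ [y]) (fun x => x)) = some (max m y) := by
  cases s with
  | nil =>
      simp [PySem.List.max?] at h
  | cons x t =>
      rw [PySem.List.max?_id_cons] at h
      rw [List.cons_append, PySem.List.max?_id_cons, List.foldl_append]
      simp_all

lemma inner_eq (a : List Int) (n : Int) (hn : n ≤ (a.length : Int)) (i : Int) (hi : 0 ≤ i) :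
    ∀ (k : Nat) (j : Int), i < j → j + k = n → ∀ (m nb : Int),
      PySem.List.max? (PySem.List.slice a (some i) (some j)) (fun y => y) = some m →
      (PySem.List.pyRange j n 1).foldl (fun nb j =>
        match PySem.List.max? (PySem.List.slice a (some i) (some (j + 1))) (fun y => y) with
        | some m =>
            if PySem.List.pyGetD a i 0 * PySem.List.pyGetD a j 0 ≤ m then nb + 1 else nb
        | none => nb) nb
      = ((PySem.List.pyRange j n 1).foldl (fun (p : Int × Int) j =>
          let aj := PySem.List.pyGetD a j 0
          let m := if p.1 < aj then aj else p.1
          (m, if PySem.List.pyGetD a i 0 * aj ≤ m then p.2 + 1 else p.2))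
        (m, nb)).2 := by
  intro k
  induction k with
  | zero =>
      intro j hij hjk m nb hm
      rw [PySem.List.pyRange_one_eq_nil (by omega : n ≤ j)]
      simp
  | succ k ih =>
      intro j hij hjk m nb hm
      have hjn : j < n := by omega
      have hjlen : j < (a.length : Int) := by omega
      rw [PySem.List.pyRange_one_cons hjn]
      simp only [List.foldl_cons]
      have hsnoc := slice_snoc a i j (by omega) (by omega) hjlen
      have hmax := max?_snoc (PySem.List.slice a (some i) (some j))
        (PySem.List.pyGetD a j 0) m hm
      rw [hsnoc, hmax]
      have hif : (if m < PySem.List.pyGetD a j 0 then PySem.List.pyGetD a j 0 else m)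
          = max m (PySem.List.pyGetD a j 0) := by
        rcases le_or_gt (PySem.List.pyGetD a j 0) m with h | h
        · simp [max_eq_left h, if_neg (not_lt.mpr h)]
        · simp [max_eq_right (le_of_lt h), if_pos h]
      simp only [hif]
      exact ih (j + 1) (by omega) (by omega) (max m (PySem.List.pyGetD a j 0)) _
        (by rw [hsnoc]; exact hmax)

-- ===== VERDICT (by name: the statement is the Claim_ definition above) =====
theorem solve_spec : Claim_equal_solve := by
  intro a n _ hpre
  unfold Pre_solve at hpre
  unfold Spec_solve solve solve_alt
  rcases hpre with hpre | hsmall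
  case inr =>
    rw [PySem.List.pyRange_one_eq_nil (by omega : n - 1 ≤ 0)]
    rfl
  apply PySem.List.foldl_congr_mem
  intro nb i hi
  rw [PySem.List.mem_pyRange_one] at hi
  obtain ⟨hi0, hin⟩ := hi
  have hilen : i < (a.length : Int) := by
    have := hpre; omega
  have hbase : (PySem.List.max? (PySem.List.slice a (some i) (some (i + 1))) (fun y => y))
      = some (PySem.List.pyGetD a i 0) := by
    rw [slice_single a i hi0 hilen, PySem.List.max?_id_cons]
    simp
  have := inner_eq a n hpre i hi0 (n - (i + 1)).toNat (i + 1) (by omega) (by omega)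
    (PySem.List.pyGetD a i 0) nb hbase
  exact this
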